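-- pv_equiv track=rewrite | github.com/masaki-code/loto | src/one_param/model_predict.py | predict_nums
-- ===== SOURCE A (Python) =====
-- def predict_nums(_x):
--     k = 0
--     _disc = {}
--     for v in _x:
--         k += 1
--         _disc[k] = v
--
--     _result = sorted(_disc.items(), key=lambda __x: __x[1], reverse=True)
--     _result = list(map(lambda _x: _x[0], _result))
--     _result = _result[0:6]
--     _result = sorted(_result)
--     return _result
-- ===== SOURCE B (Python) =====
-- def predict_nums(_x):
--     # selection by repeated max-extraction (strict '>' keeps the earliest index on ties)
--     remaining = list(enumerate(_x, 1))
--     picked = []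
--     for _ in range(min(6, len(_x))):
--         best = remaining[0]
--         for item in remaining[1:]:
--             if item[1] > best[1]:
--                 best = item
--         remaining.remove(best)
--         picked.append(best[0])
--     return sorted(picked)
-- ===== Notes on version B (the rewrite author's own statement) =====
-- stated objective: faster
-- what changed: Replaces building a dict and fully stable-sorting all n items by value with repeated max-extraction: scan the remaining (index,value) pairs min(6,n) times, each pass picking the strictly greatest value (earliest index wins ties) and removing it, then sort the at most 6 picked 1-based indices.
import Mathlib
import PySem

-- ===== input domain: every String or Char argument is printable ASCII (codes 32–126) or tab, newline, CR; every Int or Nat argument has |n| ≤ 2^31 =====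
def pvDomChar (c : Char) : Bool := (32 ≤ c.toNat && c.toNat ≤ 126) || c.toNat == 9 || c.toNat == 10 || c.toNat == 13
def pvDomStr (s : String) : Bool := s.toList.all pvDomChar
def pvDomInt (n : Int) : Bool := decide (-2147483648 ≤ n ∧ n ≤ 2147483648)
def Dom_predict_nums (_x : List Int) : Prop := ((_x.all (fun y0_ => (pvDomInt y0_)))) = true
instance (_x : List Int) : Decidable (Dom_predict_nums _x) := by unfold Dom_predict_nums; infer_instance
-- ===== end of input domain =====

-- B replaces A's dict-build + full stable sort with repeated max-extraction of the top min(6,n)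
-- (index,value) pairs; same return value, alternative algorithm.


-- ===== PORT A =====
def predict_nums (_x : List Int) : List Int :=
  let st := _x.foldl (fun (s : Int × PySem.Dict Int Int) v => (s.1 + 1, s.2.insert (s.1 + 1) v))
    ((0 : Int), PySem.Dict.empty)
  let r1 := PySem.List.sorted st.2.items (fun p => p.2) true
  let r2 := r1.map (fun p => p.1)
  let r3 := PySem.List.slice r2 (some 0) (some 6)
  PySem.List.sorted r3 (fun x => x) false

-- ===== PORT B =====
-- inner scan: best = remaining[0]; for item in remaining[1:]: if item[1] > best[1]: best = item
def pnAltPick (best : Int × Int) (rest : List (Int × Int)) : Int × Int :=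
  rest.foldl (fun b it => if b.2 < it.2 then it else b) best

-- outer loop: for _ in range(min(6, len(_x))): pick best, remaining.remove(best), picked.append(best[0])
def pnAltLoop : Nat → List (Int × Int) → List Int → List Int
  | 0, _, picked => picked
  | k+1, remaining, picked =>
    match remaining with
    | [] => picked          -- unreachable: the fuel never exceeds the length of remaining
    | r :: rs =>
      let best := pnAltPick r rs
      match PySem.List.remove? (r :: rs) best with
      | some remaining' => pnAltLoop k remaining' (picked ++ [best.1])
      | none => picked      -- unreachable: best is a member of remaining

def predict_nums_alt (_x : List Int) : List Int :=
  let picked := pnAltLoop (min 6 _x.length) (PySem.List.enumerate _x 1) []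
  PySem.List.sorted picked (fun x => x) false

-- ===== PRECONDITION & SPEC =====
def Spec_predict_nums (_x : List Int) (out : List Int) : Prop := out = predict_nums_alt _x
instance (_x : List Int) (out : List Int) : Decidable (Spec_predict_nums _x out) := by unfold Spec_predict_nums; infer_instance

-- ===== CLAIM (what is proved, stated in full; the proofs are below) =====
def Claim_equal_predict_nums : Prop := ∀ (_x : List Int), Dom_predict_nums _x → Spec_predict_nums _x (predict_nums _x)

-- ===== LEMMAS AND PROOFS =====

-- the strict order "a comes before b" in A's sorted result: larger value first, then smaller index
def pnOrd (a b : Int × Int) : Prop := b.2 < a.2 ∨ (a.2 = b.2 ∧ a.1 < b.1)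

theorem pn_insertBy_pairwise (x : Int × Int) (acc : List (Int × Int))
    (hp : acc.Pairwise pnOrd) (hidx : ∀ a ∈ acc, a.1 < x.1) :
    (PySem.List.insertBy (fun a b => decide (b.2 < a.2)) x acc).Pairwise pnOrd := by
  induction acc with
  | nil => simp [PySem.List.insertBy]
  | cons y ys ih =>
    rw [PySem.List.insertBy]
    by_cases h : y.2 < x.2
    · simp only [h, decide_true, if_true]
      refine List.Pairwise.cons ?_ hp
      intro z hz
      rcases List.mem_cons.mp hz with hz | hz
      · subst hz; exact Or.inl h
      · rcases (List.pairwise_cons.mp hp).1 z hz with h2 | h2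
        · exact Or.inl (lt_trans h2 h)
        · exact Or.inl (h2.1 ▸ h)
    · simp only [h, decide_false]
      refine List.Pairwise.cons ?_ (ih (List.pairwise_cons.mp hp).2
        (fun a ha => hidx a (List.mem_cons_of_mem _ ha)))
      intro z hz
      rcases (PySem.List.mem_insertBy _ _ _ _).mp hz with hz | hz
      · subst hz
        rcases lt_or_eq_of_le (le_of_not_gt h) with hlt | heq
        · exact Or.inl hlt
        · exact Or.inr ⟨heq.symm, hidx y (List.mem_cons_self)⟩
      · exact (List.pairwise_cons.mp hp).1 z hz

theorem pn_foldl_insertBy_pairwise (xs acc : List (Int × Int))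
    (hp : acc.Pairwise pnOrd)
    (hcross : ∀ a ∈ acc, ∀ b ∈ xs, a.1 < b.1)
    (hxs : xs.Pairwise (fun a b => a.1 < b.1)) :
    (xs.foldl (fun acc x => PySem.List.insertBy (fun a b => decide (b.2 < a.2)) x acc) acc).Pairwise pnOrd := by
  induction xs generalizing acc with
  | nil => exact hp
  | cons x xs ih =>
    simp only [List.foldl_cons]
    refine ih _ (pn_insertBy_pairwise x acc hp
      (fun a ha => hcross a ha x List.mem_cons_self)) ?_ (List.pairwise_cons.mp hxs).2
    intro a ha b hb
    rcases (PySem.List.mem_insertBy _ _ _ _).mp ha with ha | ha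
    · subst ha; exact (List.pairwise_cons.mp hxs).1 b hb
    · exact hcross a ha b (List.mem_cons_of_mem _ hb)

theorem pn_sorted_pairwise (P : List (Int × Int)) (hP : P.Pairwise (fun a b => a.1 < b.1)) :
    (PySem.List.sorted P (fun p => p.2) true).Pairwise pnOrd := by
  rw [PySem.List.sorted_rev_eq_foldl_insertBy]
  exact pn_foldl_insertBy_pairwise P [] (List.Pairwise.nil) (by simp) hP

theorem pn_pick_min (rs : List (Int × Int)) (r : Int × Int)
    (hr : ∀ it ∈ rs, r.1 < it.1) (hrs : rs.Pairwise (fun a b => a.1 < b.1)) :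
    pnAltPick r rs ∈ r :: rs ∧ ∀ x ∈ r :: rs, ¬ pnOrd x (pnAltPick r rs) := by
  induction rs generalizing r with
  | nil =>
    refine ⟨List.mem_cons_self, ?_⟩
    intro x hx
    have hxr : x = r := by simpa using hx
    subst hxr
    unfold pnAltPick pnOrd
    simp only [List.foldl_nil]
    omega
  | cons it rs ih =>
    have hstep : pnAltPick r (it :: rs) = pnAltPick (if r.2 < it.2 then it else r) rs := by
      unfold pnAltPick; simp [List.foldl_cons]
    have hr' : ∀ z ∈ rs, (if r.2 < it.2 then it else r).1 < z.1 := by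
      intro z hz
      split
      · exact (List.pairwise_cons.mp hrs).1 z hz
      · exact hr z (List.mem_cons_of_mem _ hz)
    obtain ⟨hmem, hmin⟩ := ih (if r.2 < it.2 then it else r) hr' (List.pairwise_cons.mp hrs).2
    set b := pnAltPick (if r.2 < it.2 then it else r) rs with hbdef
    rw [hstep]
    have hrit : r.1 < it.1 := hr it List.mem_cons_self
    constructor
    · rcases List.mem_cons.mp hmem with h | h
      · rw [h]; split
        · exact List.mem_cons_of_mem _ List.mem_cons_self
        · exact List.mem_cons_self
      · exact List.mem_cons_of_mem _ (List.mem_cons_of_mem _ h)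
    · intro x hx
      rcases List.mem_cons.mp hx with hx | hx
      · -- x = r
        rw [hx]
        by_cases hc : r.2 < it.2
        · have hnit : ¬ pnOrd it b := hmin it (by simp [hc])
          unfold pnOrd at hnit ⊢
          omega
        · exact hmin r (by simp [hc])
      · rcases List.mem_cons.mp hx with hx | hx
        · -- x = it
          rw [hx]
          by_cases hc : r.2 < it.2
          · exact hmin it (by simp [hc])
          · have hnr : ¬ pnOrd r b := hmin r (by simp [hc])
            intro hord
            rcases List.mem_cons.mp hmem with hb | hb
            · rw [if_neg hc] at hb
              unfold pnOrd at hord hnr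
              rw [hb] at hord
              omega
            · have h1 : it.1 < b.1 := (List.pairwise_cons.mp hrs).1 b hb
              unfold pnOrd at hord hnr
              omega
        · exact hmin x (List.mem_cons_of_mem _ hx)

theorem pn_min_unique (R : List (Int × Int)) (l0 : Int × Int) (ls : List (Int × Int)) (b : Int × Int)
    (hperm : (l0 :: ls).Perm R) (hp : (l0 :: ls).Pairwise pnOrd)
    (hb : b ∈ R) (hmin : ∀ x ∈ R, ¬ pnOrd x b) : b = l0 := by
  have hbL : b ∈ l0 :: ls := hperm.mem_iff.mpr hb
  rcases List.mem_cons.mp hbL with h | h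
  · exact h
  · exact absurd ((List.pairwise_cons.mp hp).1 b h)
      (hmin l0 (hperm.mem_iff.mp List.mem_cons_self))

theorem pn_loop (k : Nat) (R L : List (Int × Int)) (picked : List Int)
    (hk : k ≤ R.length) (hR : R.Pairwise (fun a b => a.1 < b.1))
    (hperm : L.Perm R) (hL : L.Pairwise pnOrd) :
    pnAltLoop k R picked = picked ++ (L.take k).map (fun p => p.1) := by
  induction k generalizing R L picked with
  | zero => simp [pnAltLoop]
  | succ k ih =>
    match R, hk with
    | r :: rs, hk =>
      match L, hperm.length_eq with
      | l0 :: ls, _ =>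
        obtain ⟨hmem, hmin⟩ := pn_pick_min rs r
          (fun it hit => (List.pairwise_cons.mp hR).1 it hit) (List.pairwise_cons.mp hR).2
        have hbest : pnAltPick r rs = l0 :=
          pn_min_unique (r :: rs) l0 ls (pnAltPick r rs) hperm hL hmem hmin
        have hl0mem : l0 ∈ r :: rs := hperm.mem_iff.mp List.mem_cons_self
        have hrem : PySem.List.remove? (r :: rs) l0 = some ((r :: rs).erase l0) :=
          PySem.List.remove?_eq_some_erase _ _ hl0mem
        rw [pnAltLoop, hbest, hrem]
        have hperm' : ls.Perm ((r :: rs).erase l0) := by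
          have := hperm.erase l0
          rwa [List.erase_cons_head] at this
        have hlen : k ≤ ((r :: rs).erase l0).length := by
          rw [List.length_erase_of_mem hl0mem]
          simpa using hk
        have hR' : ((r :: rs).erase l0).Pairwise (fun a b => a.1 < b.1) :=
          hR.sublist List.erase_sublist
        dsimp only
        rw [ih ((r :: rs).erase l0) ls (picked ++ [l0.1]) hlen hR' hperm'
          (List.pairwise_cons.mp hL).2]
        simp [List.take_succ_cons]

theorem pn_dict_items (xs : List Int) (k : Int) (d : PySem.Dict Int Int)
    (hk : ∀ j ∈ d.keys, j ≤ k) :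
    ((xs.foldl (fun (s : Int × PySem.Dict Int Int) v => (s.1 + 1, s.2.insert (s.1 + 1) v)) (k, d)).2).items
      = d.items ++ PySem.List.enumerate xs (k + 1) := by
  induction xs generalizing k d with
  | nil => simp [PySem.List.enumerate]
  | cons v xs ih =>
    simp only [List.foldl_cons]
    have hfresh : d.contains (k + 1) = false := by
      by_contra h
      have : d.contains (k + 1) = true := by
        cases hcb : d.contains (k + 1)
        · exact absurd hcb h
        · rfl
      have := (PySem.Dict.contains_iff_mem_keys d (k + 1)).mp this
      have := hk _ this
      omega
    have hk' : ∀ j ∈ (d.insert (k + 1) v).keys, j ≤ k + 1 := by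
      intro j hj
      rcases (PySem.Dict.mem_keys_insert d (k+1) j v).mp hj with h | h
      · omega
      · have := hk j h; omega
    rw [ih (k + 1) (d.insert (k + 1) v) hk',
      PySem.Dict.items_insert_of_not_contains d v hfresh,
      PySem.List.enumerate_cons]
    simp [add_assoc]

-- ===== VERDICT (by name: the statement is the Claim_ definition above) =====
theorem predict_nums_spec : Claim_equal_predict_nums := by
  unfold Claim_equal_predict_nums Spec_predict_nums
  intro _x _
  unfold predict_nums predict_nums_alt
  have hitems := pn_dict_items _x 0 PySem.Dict.empty (by simp [PySem.Dict.keys_empty])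
  simp only at hitems ⊢
  rw [hitems]
  have hempty : (PySem.Dict.empty : PySem.Dict Int Int).items = [] := rfl
  rw [hempty, List.nil_append]
  simp only [zero_add]
  set P : List (Int × Int) := PySem.List.enumerate _x 1 with hP
  set S : List (Int × Int) := PySem.List.sorted P (fun p => p.2) true with hS
  have hloop : pnAltLoop (min 6 _x.length) P [] = [] ++ (S.take (min 6 _x.length)).map (fun p => p.1) := by
    refine pn_loop _ P S [] ?_ ?_ ?_ ?_
    · rw [hP, PySem.List.length_enumerate]; omega
    · exact PySem.List.pairwise_lt_enumerate _x 1
    · exact PySem.List.sorted_perm P (fun p => p.2) true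
    · exact pn_sorted_pairwise P (PySem.List.pairwise_lt_enumerate _x 1)
  have hSlen : S.length = _x.length := by
    rw [hS, PySem.List.length_sorted, hP, PySem.List.length_enumerate]
  have h6 : S.take (min 6 _x.length) = S.take 6 := by
    rw [← hSlen, ← List.take_take, List.take_length]
  rw [hloop, h6, List.nil_append]
  have hslice : PySem.List.slice (S.map (fun p => p.1)) (some 0) (some 6)
      = (S.map (fun p => p.1)).take 6 := by
    rw [PySem.List.slice_zero_start, PySem.List.slice_to _ (by norm_num)]
    rfl
  rw [hslice, List.map_take]
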